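-- pv_equiv track=rewrite | github.com/wesruedlinger/HackerMan | Programming/StegoEncodeDecode.py | steg_decode_char
-- ===== SOURCE A (Python) =====
-- def steg_decode_char(stego):
--     binList = []
--     msgbit = []
--     for n in stego:
--         binList.append(format(int(n), 'b'))
--     for x in binList:
--         msgbit.append(x[-1])
--     message = chr(int(''.join(msgbit), 2))
--     return message
-- ===== SOURCE B (Python) =====
-- def steg_decode_char(stego):
--     value = 0
--     for n in stego:
--         value = value * 2 + (int(n) & 1)
--     return chr(value)
-- ===== Notes on version B (the rewrite author's own statement) =====
-- stated objective: simpler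
-- what changed: Drops the intermediate list of binary strings and the int(...,2) reparse: B accumulates the code point directly in one pass as value = value*2 + (n & 1).
import Mathlib
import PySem

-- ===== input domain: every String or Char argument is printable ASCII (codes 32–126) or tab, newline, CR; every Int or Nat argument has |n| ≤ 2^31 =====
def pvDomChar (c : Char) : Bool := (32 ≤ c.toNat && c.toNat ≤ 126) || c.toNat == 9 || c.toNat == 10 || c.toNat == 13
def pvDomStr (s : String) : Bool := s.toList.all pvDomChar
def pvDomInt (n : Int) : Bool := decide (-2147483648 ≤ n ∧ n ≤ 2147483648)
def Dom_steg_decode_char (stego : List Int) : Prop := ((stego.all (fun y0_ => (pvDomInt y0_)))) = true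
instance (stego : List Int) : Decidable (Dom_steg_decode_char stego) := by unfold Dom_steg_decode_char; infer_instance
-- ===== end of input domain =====

-- B replaces A's format-to-binary-string / take-last-char / int(...,2) reparse pipeline by a single
-- arithmetic pass accumulating the code point (objective: simpler).

-- ===== PORT A =====

-- format(n, 'b') for a natural number: most-significant bit first, '0' for 0
def pvBin (n : Nat) : List Char :=
  if h : n < 2 then [Char.ofNat (48 + n)]
  else pvBin (n / 2) ++ [Char.ofNat (48 + n % 2)]
termination_by n
decreasing_by exact Nat.div_lt_self (by omega) (by omega)

-- format(int(n), 'b') : a '-' sign followed by the binary digits of |n|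
def pvFmtB (n : Int) : List Char := if n < 0 then '-' :: pvBin n.natAbs else pvBin n.natAbs

-- int(s, 2): none = ValueError (empty string or a non-bit character)
def pvParseBin2? (s : List Char) : Option Int :=
  if s = [] ∨ ¬ (s.all fun c => c == '0' || c == '1') then none
  else some (s.foldl (fun a c => 2 * a + ((c.toNat : Int) - 48)) 0)

def steg_decode_char (stego : List Int) : String :=
  let binList := stego.map pvFmtB
  -- x[-1]: never none, a binary representation is a nonempty string
  let msgbit := binList.map (fun x => (PySem.List.pyGet? x (-1)).getD '0')
  match pvParseBin2? msgbit with
  | none => ""   -- ValueError (only reached for empty stego); excluded by Pre_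
  | some v => String.mk [Char.ofNat v.toNat]   -- chr(v); Pre_ guarantees a valid scalar value

-- ===== PORT B =====

-- value = value * 2 + (int(n) & 1), then chr(value)
def steg_decode_char_alt (stego : List Int) : String :=
  String.mk [Char.ofNat (stego.foldl (fun v n => v * 2 + PySem.Int.band n 1) 0).toNat]

-- ===== PRECONDITION & SPEC =====

-- the code point both programs decode: the parity bits of stego read msb-first
def pvCode (stego : List Int) : Int := stego.foldl (fun a n => a * 2 + n % 2) 0

-- Pre_ excludes (i) empty stego, where A raises ValueError (int('', 2)), and (ii) inputs whose
-- decoded code point is a surrogate or ≥ 0x110000: for the latter chr either raises ValueError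
-- or yields a lone surrogate, which is not a Unicode scalar value and cannot be a Lean Char.
def Pre_steg_decode_char (stego : List Int) : Prop :=
  stego ≠ [] ∧ (pvCode stego < 0xD800 ∨ 0xE000 ≤ pvCode stego) ∧ pvCode stego < 0x110000
instance (stego : List Int) : Decidable (Pre_steg_decode_char stego) := by
  unfold Pre_steg_decode_char; infer_instance

def pvWitness_steg_decode_char : List Int := [1, 1, 0, 0, 0, 0, 1]

def Spec_steg_decode_char (stego : List Int) (out : String) : Prop := out = steg_decode_char_alt stego
instance (stego : List Int) (out : String) : Decidable (Spec_steg_decode_char stego out) := by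
  unfold Spec_steg_decode_char; infer_instance

-- ===== CLAIM (what is proved, stated in full; the proofs are below) =====
def Claim_equal_steg_decode_char : Prop := ∀ (stego : List Int), Dom_steg_decode_char stego → Pre_steg_decode_char stego → Spec_steg_decode_char stego (steg_decode_char stego)

-- ===== LEMMAS AND PROOFS =====

theorem pvBin_ne_nil (n : Nat) : pvBin n ≠ [] := by
  unfold pvBin; split <;> simp

theorem pvBin_getLast? (n : Nat) :
    (pvBin n).getLast? = some (Char.ofNat (48 + n % 2)) := by
  unfold pvBin; split
  · rename_i h; rw [Nat.mod_eq_of_lt h]; rfl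
  · simp

-- the char A appends to msgbit for the element n
theorem getLast?_cons_ne_nil {α : Type} (a : α) (l : List α) (h : l ≠ []) :
    (a :: l).getLast? = l.getLast? := by
  cases l with
  | nil => exact absurd rfl h
  | cons b t => exact List.getLast?_cons_cons

theorem pvFmtB_last (n : Int) :
    (PySem.List.pyGet? (pvFmtB n) (-1)).getD '0' = Char.ofNat (48 + n.natAbs % 2) := by
  rw [PySem.List.pyGet?_neg_one]
  unfold pvFmtB; split
  · rw [getLast?_cons_ne_nil _ _ (pvBin_ne_nil _), pvBin_getLast?]; rfl
  · rw [pvBin_getLast?]; rfl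

theorem pvFmtB_last_cases (n : Int) :
    (PySem.List.pyGet? (pvFmtB n) (-1)).getD '0' = if n % 2 = 0 then '0' else '1' := by
  rw [pvFmtB_last]
  have h : n.natAbs % 2 = (n % 2).toNat := by omega
  rcases Nat.mod_two_eq_zero_or_one n.natAbs with h2 | h2 <;> rw [h2] <;>
    simp only [h2] at h <;> [skip; skip] <;> split <;> first | rfl | omega

-- the joined bit string parses to pvCode (accumulator-generalised induction)
theorem parse_fold_eq (stego : List Int) (acc : Int) :
    (stego.map (fun n : Int => if n % 2 = 0 then '0' else '1')).foldl
        (fun a c => 2 * a + ((c.toNat : Int) - 48)) acc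
      = stego.foldl (fun a n => a * 2 + n % 2) acc := by
  induction stego generalizing acc with
  | nil => rfl
  | cons n tl ih =>
      simp only [List.map_cons, List.foldl_cons]
      rw [ih]
      congr 1
      rcases Int.emod_two_eq_zero_or_one n with h | h <;> rw [h] <;> simp <;> ring

-- every extracted bit character is '0' or '1'
theorem msgbit_all_bits (stego : List Int) :
    (stego.map (fun n : Int => if n % 2 = 0 then '0' else '1')).all
      (fun c => c == '0' || c == '1') = true := by
  simp only [List.all_map, List.all_eq_true]
  intro n _
  by_cases h : n % 2 = 0 <;> simp [h, show ¬ n % 2 = 0 → n % 2 = 1 from by omega]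

theorem alt_fold_eq (stego : List Int) (acc : Int) :
    stego.foldl (fun v n => v * 2 + PySem.Int.band n 1) acc
      = stego.foldl (fun a n => a * 2 + n % 2) acc := by
  induction stego generalizing acc with
  | nil => rfl
  | cons n tl ih =>
      simp only [List.foldl_cons]
      rw [PySem.Int.band_one, PySem.Int.mod_eq_emod_of_pos (by norm_num), ih]

-- ===== VERDICT (by name: the statement is the Claim_ definition above) =====
theorem steg_decode_char_spec : Claim_equal_steg_decode_char := by
  intro stego _ hpre
  obtain ⟨hne, _, _⟩ := hpre
  unfold Spec_steg_decode_char steg_decode_char steg_decode_char_alt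
  simp only [List.map_map]
  rw [show ((fun x => (PySem.List.pyGet? x (-1)).getD '0') ∘ pvFmtB)
        = (fun n : Int => if n % 2 = 0 then '0' else '1') from funext pvFmtB_last_cases]
  have hnil : stego.map (fun n : Int => if n % 2 = 0 then '0' else '1') ≠ [] := by
    simpa using hne
  unfold pvParseBin2?
  rw [if_neg (by
    rintro (h | h)
    · exact hnil h
    · exact h (msgbit_all_bits stego))]
  rw [parse_fold_eq, alt_fold_eq]
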